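/- GENERATED by farm/mkstatement.py from design/units.tsv (unit `start_decoder.9e`) and the assertions of Vorbis/Spec/StartDecoder9.lean — do not edit.
   THE STATEMENT of the proof unit `start_decoder.9e`: segment 9e of `start_decoder` (17 instructions; entries 0x11421f;
   exits 0x113b22; ranges 0x11421f-0x11425e + 0x114427-0x114434)
   takes each of its entry assertions to one of its exit assertions (`Vorbis.Spec.StartDecoder.Seg9e`), given the contracts of its callees.
   What the names mean: Vorbis/Spec/Basic.lean (the shared hypotheses), Vorbis/Spec/StartDecoder9.lean (the assertions). The theorem to prove:
   `theorem start_decoder_9e_ok : Vorbis.Spec.start_decoder_9e.Statement`. -/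
import Vorbis.Spec.Alloc
import Vorbis.Spec.Leaves
import Vorbis.Spec.StartDecoder9
namespace Vorbis.Spec.start_decoder_9e
open X86 X86.User Asan

/-- The statement of unit `start_decoder.9e`. -/
def Statement : Prop :=
  ∀ (Lay : Layout) (_hLay : Lay.hi = 0x1000000) (μ : Microarch) (_hμ : UserX.MicroOK μ) (u₀ : State)
    (_hcode : HasCodeNat Lay u₀ Vorbis.L.start_decoder.entry Vorbis.Code.code_start_decoder.nat Vorbis.L.start_decoder.size)
    (_h_error : ∀ (others : List Obj) (frames : List (Nat × FrameLayout)), Calls Lay μ Vorbis.WayInv (Vorbis.conv u₀) Vorbis.L.error.entry (Vorbis.Spec.error.spec others frames))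
    (_h_asan_store4_noabort : Asan.SmallCheck Lay μ Vorbis.WayInv (Vorbis.CodeOK u₀) [.rax, .rcx, .rdx] 4 Vorbis.L.__asan_store4_noabort.entry)
    (_h_setup_malloc : ∀ (others : List Obj) (frames : List (Nat × FrameLayout)) (A : Arena), Calls Lay μ Vorbis.WayInv (Vorbis.conv u₀) Vorbis.L.setup_malloc.entry (Vorbis.Spec.setup_malloc.spec others frames A))
    (_h_asan_store8_noabort : Asan.SmallCheck Lay μ Vorbis.WayInv (Vorbis.CodeOK u₀) [.rax, .rcx, .rdx] 8 Vorbis.L.__asan_store8_noabort.entry),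
    Vorbis.Spec.StartDecoder.Seg9e Lay μ u₀

end Vorbis.Spec.start_decoder_9e
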